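-- pv_equiv track=rewrite | github.com/KP2301/Thai-context_Data_Privacy_Assessing_for_LLMs | analyze/dea/length/plot_graph_by_length/plot_word_graph_by_seperate_level.py | aggregate_results_by_word_range
-- ===== SOURCE A (Python) =====
-- from collections import defaultdict
--
-- def aggregate_results_by_word_range(all_results, range_size=500):
--     """
--     Aggregate results by token length ranges
--
--     Args:
--         all_results: dict of {model: [(word_count, is_leaked), ...]}
--         range_size: size of each token range
--
--     Returns:
--         dict of {model: {range_key: (success_count, total_count)}}
--     """
--     aggregated = defaultdict(lambda: defaultdict(lambda: [0, 0]))
--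
--     for model, results in all_results.items():
--         for word_count, is_leaked in results:
--             # Calculate range bucket
--             range_start = (word_count // range_size) * range_size
--             range_key = f"{range_start}-{range_start + range_size}"
--
--             # Count total and successes
--             aggregated[model][range_key][1] += 1  # total count
--             if is_leaked:
--                 aggregated[model][range_key][0] += 1  # success count
--
--     return aggregated
-- ===== SOURCE B (Python) =====
-- from collections import defaultdict
--
-- def aggregate_results_by_word_range(all_results, range_size=500):
--     # Pass 1: group the is_leaked flags by model and range bucket.
--     groups = defaultdict(lambda: defaultdict(list))
--     for model, results in all_results.items():
--         for word_count, is_leaked in results: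
--             range_start = (word_count // range_size) * range_size
--             groups[model][f"{range_start}-{range_start + range_size}"].append(is_leaked)
--     # Pass 2: reduce each bucket to [success_count, total_count].
--     aggregated = defaultdict(lambda: defaultdict(lambda: [0, 0]))
--     for model, buckets in groups.items():
--         for range_key, bucket in buckets.items():
--             aggregated[model][range_key] = [bucket.count(True), len(bucket)]
--     return aggregated
-- ===== Notes on version B (the rewrite author's own statement) =====
-- stated objective: alternative
-- what changed: A builds the nested counter dict in one pass, incrementing the [success,total] cells in place; B first groups the is_leaked flags into per-model per-range buckets, then a second reduction pass turns each bucket into [count of True, length].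
import Mathlib
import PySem

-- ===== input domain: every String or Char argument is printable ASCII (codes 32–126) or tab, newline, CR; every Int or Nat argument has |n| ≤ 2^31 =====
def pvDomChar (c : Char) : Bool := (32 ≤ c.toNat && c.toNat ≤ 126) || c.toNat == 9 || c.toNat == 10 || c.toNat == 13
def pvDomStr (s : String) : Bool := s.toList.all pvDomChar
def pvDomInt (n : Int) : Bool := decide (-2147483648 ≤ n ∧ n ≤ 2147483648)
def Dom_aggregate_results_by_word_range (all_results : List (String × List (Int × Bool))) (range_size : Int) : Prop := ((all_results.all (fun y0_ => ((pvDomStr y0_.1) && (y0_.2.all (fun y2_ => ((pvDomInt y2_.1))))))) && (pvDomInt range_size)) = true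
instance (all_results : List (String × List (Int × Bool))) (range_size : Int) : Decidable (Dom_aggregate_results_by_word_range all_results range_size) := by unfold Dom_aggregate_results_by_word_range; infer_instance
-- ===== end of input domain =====

-- B replaces A's single pass that increments [success,total] counters in place by a grouping pass
-- (model -> range_key -> list of leak flags) followed by a reduction pass; objective: alternative
-- decomposition, same asymptotic cost. Return value only (the Python dicts are freshly built by both).

-- ===== PORT A =====
-- A-side helper: `lst[i] += 1`; exact for an in-range index (here the list is always the
-- 2-element bucket [success, total] and i ∈ {0, 1}, so Python never raises).
def pyIncItem (l : List Int) (i : Int) : List Int :=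
  PySem.List.pySetD l i (PySem.List.pyGetD l i 0 + 1)

def aggregate_results_by_word_range (all_results : List (String × List (Int × Bool))) (range_size : Int) : List (String × List (String × List Int)) :=
  let aggregated : PySem.Dict String (PySem.Dict String (List Int)) :=
    all_results.foldl (fun agg mr =>
      mr.2.foldl (fun agg wl =>
        let range_start := PySem.Int.floordiv wl.1 range_size * range_size
        let range_key := String.ofList (PySem.Int.toChars range_start ++ ['-'] ++ PySem.Int.toChars (range_start + range_size))
        let inner := agg.getD mr.1 PySem.Dict.empty
        let cur := inner.getD range_key [0, 0]
        let cur := pyIncItem cur 1                              -- aggregated[model][range_key][1] += 1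
        let cur := if wl.2 then pyIncItem cur 0 else cur        -- if is_leaked: ...[0] += 1
        agg.insert mr.1 (inner.insert range_key cur)) agg) PySem.Dict.empty
  aggregated.items.map (fun md => (md.1, md.2.items))

-- ===== PORT B =====
-- B-side helper: [bucket.count(True), len(bucket)]
def bucketStats (bucket : List Bool) : List Int :=
  [((PySem.List.count bucket true) : Int), (bucket.length : Int)]

def aggregate_results_by_word_range_alt (all_results : List (String × List (Int × Bool))) (range_size : Int) : List (String × List (String × List Int)) :=
  -- pass 1: group the is_leaked flags by model and range bucket
  let groups : PySem.Dict String (PySem.Dict String (List Bool)) :=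
    all_results.foldl (fun g mr =>
      mr.2.foldl (fun g wl =>
        let range_start := PySem.Int.floordiv wl.1 range_size * range_size
        let range_key := String.ofList (PySem.Int.toChars range_start ++ ['-'] ++ PySem.Int.toChars (range_start + range_size))
        g.insert mr.1 ((g.getD mr.1 PySem.Dict.empty).modify range_key [] (· ++ [wl.2]))) g) PySem.Dict.empty
  -- pass 2: reduce each bucket to [success_count, total_count]
  groups.items.map (fun md => (md.1, md.2.items.map (fun kb => (kb.1, bucketStats kb.2))))

-- ===== PRECONDITION & SPEC =====
-- Pre_: range_size ≠ 0 — on range_size = 0 the Python A raises ZeroDivisionError at `word_count // range_size`.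
def Pre_aggregate_results_by_word_range (all_results : List (String × List (Int × Bool))) (range_size : Int) : Prop := range_size ≠ 0
instance (all_results : List (String × List (Int × Bool))) (range_size : Int) : Decidable (Pre_aggregate_results_by_word_range all_results range_size) := by unfold Pre_aggregate_results_by_word_range; infer_instance

def pvWitness_aggregate_results_by_word_range : (List (String × List (Int × Bool))) × Int :=
  ([("gpt", [(120, true), (700, false), (130, true)]), ("llama", [(40, false)])], 500)

def Spec_aggregate_results_by_word_range (all_results : List (String × List (Int × Bool))) (range_size : Int) (out : List (String × List (String × List Int))) : Prop := out = aggregate_results_by_word_range_alt all_results range_size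
instance (all_results : List (String × List (Int × Bool))) (range_size : Int) (out : List (String × List (String × List Int))) : Decidable (Spec_aggregate_results_by_word_range all_results range_size out) := by unfold Spec_aggregate_results_by_word_range; infer_instance

-- ===== CLAIM (what is proved, stated in full; the proofs are below) =====
def Claim_equal_aggregate_results_by_word_range : Prop := ∀ (all_results : List (String × List (Int × Bool))) (range_size : Int), Dom_aggregate_results_by_word_range all_results range_size → Pre_aggregate_results_by_word_range all_results range_size → Spec_aggregate_results_by_word_range all_results range_size (aggregate_results_by_word_range all_results range_size)

-- ===== LEMMAS AND PROOFS =====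

-- Map a function over the values of a dict (helper for the simulation argument only).
def pvMapD {κ ν ν' : Type} [BEq κ] (f : ν → ν') (d : PySem.Dict κ ν) : PySem.Dict κ ν' :=
  PySem.Dict.mk (d.items.map (fun p => (p.1, f p.2)))

theorem get?_pvMapD {κ ν ν' : Type} [BEq κ] (f : ν → ν') (d : PySem.Dict κ ν) (k : κ) :
    (pvMapD f d).get? k = (d.get? k).map f := by
  obtain ⟨l⟩ := d
  induction l with
  | nil => simp [pvMapD, PySem.Dict.get?]
  | cons hd t ih =>
      obtain ⟨k1, v1⟩ := hd
      simp only [pvMapD, List.map_cons]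
      rw [PySem.Dict.get?_mk_cons, PySem.Dict.get?_mk_cons]
      by_cases hk : k1 == k
      · simp [hk]
      · simp only [hk, if_neg, Bool.false_eq_true, not_false_eq_true]
        simpa [pvMapD] using ih

theorem getD_pvMapD {κ ν ν' : Type} [BEq κ] (f : ν → ν') (d : PySem.Dict κ ν) (k : κ) (d0 : ν) :
    (pvMapD f d).getD k (f d0) = f (d.getD k d0) := by
  rw [PySem.Dict.getD_eq_get?_getD, PySem.Dict.getD_eq_get?_getD, get?_pvMapD]
  cases d.get? k <;> simp

theorem insert_pvMapD {κ ν ν' : Type} [BEq κ] [LawfulBEq κ] (f : ν → ν') (d : PySem.Dict κ ν) (k : κ) (v : ν) :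
    pvMapD f (d.insert k v) = (pvMapD f d).insert k (f v) := by
  have hc : (pvMapD f d).contains k = d.contains k := by
    rw [PySem.Dict.contains_eq_isSome_get?, PySem.Dict.contains_eq_isSome_get?, get?_pvMapD]
    cases d.get? k <;> simp
  apply PySem.Dict.ext
  by_cases h : d.contains k
  · rw [pvMapD, PySem.Dict.items_insert_of_contains _ _ (h := h),
      PySem.Dict.items_insert_of_contains _ _ (h := hc.trans h)]
    simp only [pvMapD, List.map_map]
    apply List.map_congr_left
    intro p _
    by_cases hk : p.1 == k <;> simp [hk]
  · rw [pvMapD, PySem.Dict.items_insert_of_not_contains _ _ (h := by simpa using h),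
      PySem.Dict.items_insert_of_not_contains _ _ (h := by rw [hc]; simpa using h)]
    simp [pvMapD]

theorem pvMapD_empty {κ ν ν' : Type} [BEq κ] (f : ν → ν') :
    pvMapD f (PySem.Dict.empty : PySem.Dict κ ν) = PySem.Dict.empty := by
  simp [pvMapD, PySem.Dict.empty]

-- bucketStats of an extended bucket, as A's in-place increments compute it.
theorem bucketStats_append (bs : List Bool) (b : Bool) :
    bucketStats (bs ++ [b]) =
      (if b then pyIncItem (pyIncItem (bucketStats bs) 1) 0 else pyIncItem (bucketStats bs) 1) := by
  cases b <;>
    simp [bucketStats, pyIncItem, PySem.List.pySetD, PySem.List.pySet?, PySem.List.pyGetD,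
      PySem.List.pyGet?, PySem.List.pyIdx?, PySem.List.count_eq, List.count_append]

-- The simulation: A's accumulator is pvMapD (pvMapD bucketStats) of B's accumulator, through both loops.
theorem inner_fold_sim (range_size : Int) (m : String) (results : List (Int × Bool))
    (g : PySem.Dict String (PySem.Dict String (List Bool))) :
    results.foldl (fun agg wl =>
        let range_start := PySem.Int.floordiv wl.1 range_size * range_size
        let range_key := String.ofList (PySem.Int.toChars range_start ++ ['-'] ++ PySem.Int.toChars (range_start + range_size))
        let inner := agg.getD m PySem.Dict.empty
        let cur := inner.getD range_key [0, 0]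
        let cur := pyIncItem cur 1
        let cur := if wl.2 then pyIncItem cur 0 else cur
        agg.insert m (inner.insert range_key cur)) (pvMapD (pvMapD bucketStats) g)
      = pvMapD (pvMapD bucketStats)
          (results.foldl (fun g wl =>
            let range_start := PySem.Int.floordiv wl.1 range_size * range_size
            let range_key := String.ofList (PySem.Int.toChars range_start ++ ['-'] ++ PySem.Int.toChars (range_start + range_size))
            g.insert m ((g.getD m PySem.Dict.empty).modify range_key [] (· ++ [wl.2]))) g) := by
  induction results generalizing g with
  | nil => rfl
  | cons wl t ih =>
      simp only [List.foldl_cons]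
      rw [← ih]
      congr 1
      have hinner : (pvMapD (pvMapD bucketStats) g).getD m PySem.Dict.empty
          = pvMapD bucketStats (g.getD m PySem.Dict.empty) := by
        have := getD_pvMapD (pvMapD bucketStats) g m PySem.Dict.empty
        rwa [pvMapD_empty] at this
      have hbs : (bucketStats []) = ([0, 0] : List Int) := by simp [bucketStats]
      set key := String.ofList (PySem.Int.toChars (PySem.Int.floordiv wl.1 range_size * range_size) ++ ['-'] ++
        PySem.Int.toChars (PySem.Int.floordiv wl.1 range_size * range_size + range_size)) with hkey
      have hcur : (pvMapD bucketStats (g.getD m PySem.Dict.empty)).getD key [0, 0]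
          = bucketStats ((g.getD m PySem.Dict.empty).getD key []) := by
        rw [← hbs]; exact getD_pvMapD bucketStats _ key []
      simp only [hinner, hcur]
      rw [insert_pvMapD, PySem.Dict.modify, insert_pvMapD, bucketStats_append]

theorem outer_fold_sim (range_size : Int) (rs : List (String × List (Int × Bool)))
    (g : PySem.Dict String (PySem.Dict String (List Bool))) :
    rs.foldl (fun agg mr =>
        mr.2.foldl (fun agg wl =>
          let range_start := PySem.Int.floordiv wl.1 range_size * range_size
          let range_key := String.ofList (PySem.Int.toChars range_start ++ ['-'] ++ PySem.Int.toChars (range_start + range_size))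
          let inner := agg.getD mr.1 PySem.Dict.empty
          let cur := inner.getD range_key [0, 0]
          let cur := pyIncItem cur 1
          let cur := if wl.2 then pyIncItem cur 0 else cur
          agg.insert mr.1 (inner.insert range_key cur)) agg) (pvMapD (pvMapD bucketStats) g)
      = pvMapD (pvMapD bucketStats)
          (rs.foldl (fun g mr =>
            mr.2.foldl (fun g wl =>
              let range_start := PySem.Int.floordiv wl.1 range_size * range_size
              let range_key := String.ofList (PySem.Int.toChars range_start ++ ['-'] ++ PySem.Int.toChars (range_start + range_size))
              g.insert mr.1 ((g.getD mr.1 PySem.Dict.empty).modify range_key [] (· ++ [wl.2]))) g) g) := by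
  induction rs generalizing g with
  | nil => rfl
  | cons mr t ih =>
      simp only [List.foldl_cons]
      rw [inner_fold_sim, ih]

-- ===== VERDICT (by name: the statement is the Claim_ definition above) =====
theorem aggregate_results_by_word_range_spec : Claim_equal_aggregate_results_by_word_range := by
  intro all_results range_size _ _
  unfold Spec_aggregate_results_by_word_range
  unfold aggregate_results_by_word_range aggregate_results_by_word_range_alt
  simp only
  rw [show (PySem.Dict.empty : PySem.Dict String (PySem.Dict String (List Int)))
      = pvMapD (pvMapD bucketStats) PySem.Dict.empty from (pvMapD_empty _).symm,
    outer_fold_sim]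
  generalize (all_results.foldl _ PySem.Dict.empty :
    PySem.Dict String (PySem.Dict String (List Bool))) = g
  obtain ⟨l⟩ := g
  simp [pvMapD, List.map_map, Function.comp]
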